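-- pv_equiv track=rewrite | github.com/MooYongArin/grader-python | 08_Dict/08_Dict_★★_Texting.py | keys2text
-- ===== SOURCE A (Python) =====
-- import string
--
-- def keys2text( keys ):
--     dct = {" ":"0"}
--     starter = 2
--     repeat = 1
--     count = 0
--     for letter in string.ascii_lowercase:
--         count += 1
--         # จบที่ r
--         if count == 19:
--             break
--         if repeat == 4:
--             repeat = 1
--             starter += 1
--         dct[letter] = str(starter)*repeat
--         repeat += 1
--     dct.update({'s':'7777','t':'8','u':'88','v':'888','w':'9','x':'99','y':'999','z':'9999'})
--
--     keys = keys.split()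
--     inv_dct = {v: k for k, v in dct.items()}
--     text = ""
--     for item in keys:
--         if item in inv_dct:
--             text += inv_dct[item]
--     return text
-- ===== SOURCE B (Python) =====
-- def keys2text(keys):
--     groups = {'0': ' ', '2': 'abc', '3': 'def', '4': 'ghi', '5': 'jkl',
--               '6': 'mno', '7': 'pqrs', '8': 'tuv', '9': 'wxyz'}
--     out = []
--     for token in keys.split():
--         g = groups.get(token[0])
--         n = len(token)
--         if g is not None and n <= len(g) and token == token[0] * n:
--             out.append(g[n - 1])
--     return ''.join(out)
-- ===== Notes on version B (the rewrite author's own statement) =====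
-- stated objective: idiomatic
-- what changed: B drops A's generated letter-to-code dict and its inversion entirely and instead decodes each token directly from per-digit letter-group strings, indexing the group by the token's press count after a uniform-run check.
import Mathlib
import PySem

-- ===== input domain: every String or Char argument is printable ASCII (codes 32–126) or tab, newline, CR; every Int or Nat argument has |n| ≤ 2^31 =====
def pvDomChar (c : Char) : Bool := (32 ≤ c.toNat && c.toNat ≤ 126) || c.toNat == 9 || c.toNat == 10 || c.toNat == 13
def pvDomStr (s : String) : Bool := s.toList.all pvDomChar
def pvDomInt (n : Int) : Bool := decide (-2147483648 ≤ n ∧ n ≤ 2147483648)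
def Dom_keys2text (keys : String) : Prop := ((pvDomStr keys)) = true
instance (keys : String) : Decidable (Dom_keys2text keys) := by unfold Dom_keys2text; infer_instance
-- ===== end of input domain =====

-- B replaces A's generated letter→code dict and its inversion by direct per-digit
-- letter groups indexed by press count (objective: idiomatic).

-- Python string repetition s * n (exact: empty for n ≤ 0); used by both ports
def pyStrMul (s : String) (n : Int) : String :=
  String.mk (List.flatten (List.replicate n.toNat s.toList))

-- ===== PORT A =====
-- the 'for letter in string.ascii_lowercase' loop with its break at count == 19
def k2tLoop : List Char → PySem.Dict String String → Int → Int → Int → PySem.Dict String String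
  | [], dct, _, _, _ => dct
  | letter :: rest, dct, starter, rep, count =>
    let count := count + 1
    if count == 19 then dct
    else
      let p := if rep == 4 then (starter + 1, (1 : Int)) else (starter, rep)
      let dct := dct.insert (String.mk [letter]) (pyStrMul (PySem.Int.toStr p.1) p.2)
      k2tLoop rest dct p.1 (p.2 + 1) count

def keys2text (keys : String) : String :=
  let dct := (k2tLoop "abcdefghijklmnopqrstuvwxyz".toList (PySem.Dict.ofList [(" ", "0")]) 2 1 0).update
      [("s", "7777"), ("t", "8"), ("u", "88"), ("v", "888"), ("w", "9"), ("x", "99"), ("y", "999"), ("z", "9999")]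
  let toks := PySem.Str.split₀ keys
  let inv := dct.items.foldl (fun acc kv => acc.insert kv.2 kv.1) PySem.Dict.empty
  -- 'if item in inv_dct: text += inv_dct[item]' = append the looked-up value when present
  String.mk (toks.foldl (fun text item =>
    match inv.get? item with
    | some v => text ++ v.toList
    | none => text) [])

-- ===== PORT B =====
def k2tGroups : PySem.Dict String String :=
  PySem.Dict.ofList [("0", " "), ("2", "abc"), ("3", "def"), ("4", "ghi"), ("5", "jkl"),
                     ("6", "mno"), ("7", "pqrs"), ("8", "tuv"), ("9", "wxyz")]

def keys2text_alt (keys : String) : String :=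
  let out := (PySem.Str.split₀ keys).foldl (fun out token =>
    match PySem.Str.pyGet? token 0 with   -- token[0]; split tokens are nonempty, so 'none' is unreachable
    | none => out
    | some c0 =>
      match k2tGroups.get? (String.mk [c0]) with   -- g = groups.get(token[0])
      | none => out                                 -- 'g is not None' fails
      | some g =>
        let n := PySem.Str.len token
        if n ≤ PySem.Str.len g ∧ token = pyStrMul (String.mk [c0]) n then
          match PySem.Str.pyGet? g (n - 1) with     -- out.append(g[n-1]); in range since 1 ≤ n ≤ len(g)
          | some ch => out ++ [String.mk [ch]]
          | none => out
        else out) []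
  PySem.Str.join "" out

-- ===== PRECONDITION & SPEC =====
def Spec_keys2text (keys : String) (out : String) : Prop := out = keys2text_alt keys
instance (keys : String) (out : String) : Decidable (Spec_keys2text keys out) := by unfold Spec_keys2text; infer_instance

-- ===== CLAIM (what is proved, stated in full; the proofs are below) =====
def Claim_equal_keys2text : Prop := ∀ (keys : String), Dom_keys2text keys → Spec_keys2text keys (keys2text keys)

-- ===== LEMMAS AND PROOFS =====

-- A's inverted dict, as the literal association list it evaluates to
def invLit : PySem.Dict String String := PySem.Dict.mk
  [("0", " "), ("2", "a"), ("22", "b"), ("222", "c"), ("3", "d"), ("33", "e"), ("333", "f"),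
   ("4", "g"), ("44", "h"), ("444", "i"), ("5", "j"), ("55", "k"), ("555", "l"),
   ("6", "m"), ("66", "n"), ("666", "o"), ("7", "p"), ("77", "q"), ("777", "r"), ("7777", "s"),
   ("8", "t"), ("88", "u"), ("888", "v"), ("9", "w"), ("99", "x"), ("999", "y"), ("9999", "z")]

def keyList : List String :=
  ["0", "2", "22", "222", "3", "33", "333", "4", "44", "444", "5", "55", "555",
   "6", "66", "666", "7", "77", "777", "7777", "8", "88", "888", "9", "99", "999", "9999"]

def pieceA (t : String) : List Char :=
  match invLit.get? t with
  | some v => v.toList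
  | none => []

def pieceB (t : String) : List String :=
  match PySem.Str.pyGet? t 0 with
  | none => []
  | some c0 =>
    match k2tGroups.get? (String.mk [c0]) with
    | none => []
    | some g =>
      if PySem.Str.len t ≤ PySem.Str.len g ∧ t = pyStrMul (String.mk [c0]) (PySem.Str.len t) then
        match PySem.Str.pyGet? g (PySem.Str.len t - 1) with
        | some ch => [String.mk [ch]]
        | none => []
      else []

lemma invA_eq :
    ((k2tLoop "abcdefghijklmnopqrstuvwxyz".toList (PySem.Dict.ofList [(" ", "0")]) 2 1 0).update
      [("s", "7777"), ("t", "8"), ("u", "88"), ("v", "888"), ("w", "9"), ("x", "99"), ("y", "999"), ("z", "9999")]).items.foldl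
      (fun acc kv => acc.insert kv.2 kv.1) PySem.Dict.empty = invLit := by decide

lemma foldl_A (d : PySem.Dict String String) (l : List String) (init : List Char) :
    l.foldl (fun text item =>
      match d.get? item with
      | some v => text ++ v.toList
      | none => text) init
    = init ++ l.flatMap (fun item =>
      match d.get? item with
      | some v => v.toList
      | none => []) := by
  induction l generalizing init with
  | nil => simp
  | cons a rest ih =>
    simp only [List.foldl_cons, List.flatMap_cons, ← List.append_assoc]
    rw [ih]
    congr 1
    cases d.get? a <;> simp

lemma keys2text_eq (keys : String) :
    keys2text keys = String.mk ((PySem.Str.split₀ keys).flatMap pieceA) := by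
  simp only [keys2text]
  rw [invA_eq, foldl_A]
  simp only [List.nil_append]
  rfl

lemma foldl_B (l : List String) (init : List String) :
    l.foldl (fun out token =>
      match PySem.Str.pyGet? token 0 with
      | none => out
      | some c0 =>
        match k2tGroups.get? (String.mk [c0]) with
        | none => out
        | some g =>
          if PySem.Str.len token ≤ PySem.Str.len g ∧ token = pyStrMul (String.mk [c0]) (PySem.Str.len token) then
            match PySem.Str.pyGet? g (PySem.Str.len token - 1) with
            | some ch => out ++ [String.mk [ch]]
            | none => out
          else out) init
    = init ++ l.flatMap pieceB := by
  induction l generalizing init with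
  | nil => simp
  | cons a rest ih =>
    simp only [List.foldl_cons, List.flatMap_cons, ← List.append_assoc]
    rw [ih]
    congr 1
    unfold pieceB
    rcases hc : PySem.Str.pyGet? a 0 with _ | c0
    · simp
    · rcases hg : k2tGroups.get? (String.mk [c0]) with _ | g
      · simp [hg]
      · simp only [hg]
        split
        · rcases hp : PySem.Str.pyGet? g (PySem.Str.len a - 1) with _ | ch
          · simp
          · simp
        · simp

lemma join_nil_flatten (l : List (List Char)) : PySem.Chars.join [] l = l.flatten := by
  induction l with
  | nil => simp [PySem.Chars.join_nil]
  | cons a rest ih =>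
    cases rest with
    | nil => simp [PySem.Chars.join_singleton]
    | cons b r => rw [PySem.Chars.join_cons_cons, List.flatten_cons, ← ih]; simp

lemma keys2text_alt_eq (keys : String) :
    keys2text_alt keys = String.mk (((PySem.Str.split₀ keys).flatMap pieceB).flatMap String.toList) := by
  simp only [keys2text_alt]
  rw [foldl_B]
  simp only [List.nil_append]
  unfold PySem.Str.join
  rw [show "".toList = ([] : List Char) from rfl, join_nil_flatten]
  rfl

lemma rep_mem (d : String) (n : Nat) (hd : d ∈ k2tGroups.keys) (h1 : 1 ≤ n)
    (hle : n ≤ (k2tGroups.getD d "").toList.length) : pyStrMul d (n : Int) ∈ keyList := by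
  rw [show k2tGroups.keys = ["0", "2", "3", "4", "5", "6", "7", "8", "9"] from by decide] at hd
  fin_cases hd <;>
    (have h4 : n ≤ 4 := le_trans hle (by decide)
     interval_cases n <;> revert hle <;> decide)

lemma piece_eq (t : String) : pieceA t = (pieceB t).flatMap String.toList := by
  by_cases hm : t ∈ keyList
  · fin_cases hm <;> decide
  · have hA : invLit.get? t = none := by
      rw [PySem.Dict.get?_eq_none_iff_not_mem_keys]
      simpa [invLit, keyList] using hm
    unfold pieceA pieceB
    rw [hA]
    rcases hc : PySem.Str.pyGet? t 0 with _ | c0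
    · simp
    · rcases hg : k2tGroups.get? (String.mk [c0]) with _ | g
      · simp [hg]
      · simp only [hg]
        split
        next h =>
          exfalso
          obtain ⟨hle, heq⟩ := h
          have hlen : PySem.Str.len t = (t.toList.length : Int) := by
            simp [PySem.Str.len]
          have hne : t.toList ≠ [] := by
            intro h0
            simp [PySem.Str.pyGet?, h0, PySem.List.pyGet?, PySem.List.pyIdx?] at hc
          have h1 : 1 ≤ t.toList.length := List.length_pos_of_ne_nil hne
          have hd : String.mk [c0] ∈ k2tGroups.keys := by
            by_contra hnd
            have := (PySem.Dict.get?_eq_none_iff_not_mem_keys k2tGroups (String.mk [c0])).mpr hnd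
            simp [this] at hg
          have hgd : k2tGroups.getD (String.mk [c0]) "" = g :=
            PySem.Dict.getD_of_get?_eq_some _ _ hg
          have hle' : t.toList.length ≤ (k2tGroups.getD (String.mk [c0]) "").toList.length := by
            rw [hgd]
            have hleng : PySem.Str.len g = (g.toList.length : Int) := by
              simp [PySem.Str.len]
            rw [hlen, hleng] at hle
            exact_mod_cast hle
          have hmem := rep_mem (String.mk [c0]) t.toList.length hd h1 hle'
          rw [hlen] at heq
          exact hm (heq ▸ hmem)
        next => simp

-- ===== VERDICT (by name: the statement is the Claim_ definition above) =====
theorem keys2text_spec : Claim_equal_keys2text := by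
  intro keys _
  unfold Spec_keys2text
  rw [keys2text_eq, keys2text_alt_eq]
  congr 1
  rw [List.flatMap_assoc]
  symm
  exact List.flatMap_congr (fun t _ => (piece_eq t).symm)
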